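-- pv_equiv track=rewrite | github.com/Pirozhok55/OmGTU | Olimpiad/razvedka.py | razved
-- ===== SOURCE A (Python) =====
-- import math
--
-- def razved(n):
--     if n == 3:
--         return 1
--     if n < 3:
--         return 0
--     else:
--         even = math.floor(n/2)
--         odd = math.floor(n/2) + (n%2)
--         return razved(even) + razved(odd)
-- ===== SOURCE B (Python) =====
-- def razved(n):
--     if n < 3:
--         return 0
--     p = 1
--     while 6 * p <= n:
--         p *= 2
--     return abs(n - 4 * p)
-- ===== Notes on version B (the rewrite author's own statement) =====
-- stated objective: faster
-- what changed: Replaces the recursive halving count by a closed form: the answer is the distance from n to the nearest power of two, found with a doubling loop instead of recursion.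
import Mathlib
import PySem

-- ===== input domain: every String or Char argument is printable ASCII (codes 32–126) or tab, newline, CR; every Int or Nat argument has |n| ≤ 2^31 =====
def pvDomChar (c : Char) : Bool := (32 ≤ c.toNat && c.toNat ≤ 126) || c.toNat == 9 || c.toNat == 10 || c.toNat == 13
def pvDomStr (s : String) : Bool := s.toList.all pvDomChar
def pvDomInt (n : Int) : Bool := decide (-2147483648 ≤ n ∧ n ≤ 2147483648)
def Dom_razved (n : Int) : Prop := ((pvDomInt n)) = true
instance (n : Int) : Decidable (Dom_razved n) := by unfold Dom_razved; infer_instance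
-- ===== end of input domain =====

-- B replaces A's linear recursion by a closed form — the distance from n to the nearest
-- power of two — found with a doubling loop (objective: faster, asymptotic).

-- ===== PORT A =====
-- math.floor(n/2) is exact on |n| ≤ 2^31 (floats are exact below 2^53), so it is floor division.
def razved (n : Int) : Int :=
  if n = 3 then 1
  else if n < 3 then 0
  else razved (PySem.Int.floordiv n 2) +
       razved (PySem.Int.floordiv n 2 + PySem.Int.mod n 2)
termination_by n.toNat
decreasing_by
  · have h2 : PySem.Int.floordiv n 2 = n / 2 := PySem.Int.floordiv_eq_ediv_of_pos (by omega)
    omega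
  · have h2 : PySem.Int.floordiv n 2 = n / 2 := PySem.Int.floordiv_eq_ediv_of_pos (by omega)
    have h3 : PySem.Int.mod n 2 = n % 2 := PySem.Int.mod_eq_emod_of_pos (by omega)
    omega

-- ===== PORT B =====
-- the while loop of Source B, written with a fuel argument (n.toNat steps always suffice)
def razvedLoop (fuel : Nat) (n p : Int) : Int :=
  match fuel with
  | 0 => p
  | f + 1 => if 6 * p ≤ n then razvedLoop f n (2 * p) else p

def razved_alt (n : Int) : Int :=
  if n < 3 then 0
  else |n - 4 * razvedLoop n.toNat n 1|

-- ===== PRECONDITION & SPEC =====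
def Spec_razved (n : Int) (out : Int) : Prop := out = razved_alt n
instance (n : Int) (out : Int) : Decidable (Spec_razved n out) := by unfold Spec_razved; infer_instance

-- ===== CLAIM (what is proved, stated in full; the proofs are below) =====
def Claim_equal_razved : Prop := ∀ (n : Int), Dom_razved n → Spec_razved n (razved n)

-- ===== LEMMAS AND PROOFS =====

-- Characterisation of A: on 3·2^k ≤ n ≤ 6·2^k, razved n = |n - 4·2^k|.
theorem razved_closed (k : Nat) : ∀ n : Int, 3 * 2 ^ k ≤ n → n ≤ 6 * 2 ^ k →
    razved n = |n - 4 * 2 ^ k| := by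
  induction k with
  | zero =>
    intro n h1 h2
    simp only [pow_zero] at *
    interval_cases n <;> simp [razved, PySem.Int.floordiv, PySem.Int.mod]
  | succ k ih =>
    intro n h1 h2
    have hn6 : (6 : Int) ≤ n := by
      have e1 : (3:Int) * 2 ^ (k+1) = 6 * 2 ^ k := by ring
      have : (1:Int) ≤ 2 ^ k := one_le_pow₀ (by norm_num)
      omega
    have he : PySem.Int.floordiv n 2 = n / 2 := PySem.Int.floordiv_eq_ediv_of_pos (by omega)
    have hm : PySem.Int.mod n 2 = n % 2 := PySem.Int.mod_eq_emod_of_pos (by omega)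
    rw [razved.eq_def]
    rw [if_neg (by omega), if_neg (by omega), he, hm]
    set e : Int := n / 2 with hedef
    set o : Int := n / 2 + n % 2 with hodef
    have hsum : e + o = n := by omega
    have hle : e ≤ o := by omega
    have hpk : (0:Int) < 2 ^ k := by positivity
    have h1' : 3 * 2 ^ k ≤ e := by
      have : 3 * 2 ^ (k+1) = 6 * 2 ^ k := by ring
      omega
    have h2' : o ≤ 6 * 2 ^ k := by
      have : 6 * 2 ^ (k+1) = 12 * 2 ^ k := by ring
      omega
    have ihe := ih e h1' (by omega)
    have iho := ih o (by omega) h2'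
    rw [ihe, iho]
    have hk1 : (2:Int) ^ (k+1) = 2 * 2 ^ k := by ring
    rcases abs_cases (e - 4 * 2 ^ k) with ⟨ha, _⟩ | ⟨ha, _⟩ <;>
      rcases abs_cases (o - 4 * 2 ^ k) with ⟨hb, _⟩ | ⟨hb, _⟩ <;>
      rcases abs_cases (n - 4 * 2 ^ (k+1)) with ⟨hc, _⟩ | ⟨hc, _⟩ <;>
      rw [ha, hb, hc] <;> omega

-- Characterisation of B's loop: it returns the largest power-of-two multiple 2^k·p with 6·2^k·p ≤ n.
theorem razvedLoop_spec : ∀ (fuel : Nat) (n p : Int), 0 < p → 3 * p ≤ n →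
    n < 6 * (2 ^ fuel * p) →
    ∃ k : Nat, razvedLoop fuel n p = 2 ^ k * p ∧ 3 * (2 ^ k * p) ≤ n ∧ n < 6 * (2 ^ k * p) := by
  intro fuel
  induction fuel with
  | zero =>
    intro n p hp h3 h6
    exact ⟨0, by simp [razvedLoop], by simpa using h3, by simpa using h6⟩
  | succ f ih =>
    intro n p hp h3 h6
    rw [razvedLoop]
    by_cases h : 6 * p ≤ n
    · rw [if_pos h]
      obtain ⟨k, hk, hk3, hk6⟩ := ih n (2 * p) (by omega) (by omega)
        (by rw [pow_succ] at h6; nlinarith)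
      refine ⟨k + 1, by rw [hk]; ring, ?_, ?_⟩
      · rw [show (2:Int) ^ (k+1) * p = 2 ^ k * (2 * p) from by ring]; exact hk3
      · rw [show (2:Int) ^ (k+1) * p = 2 ^ k * (2 * p) from by ring]; exact hk6
    · rw [if_neg h]
      exact ⟨0, by simp, by simpa using h3, by simpa using h⟩

theorem lt_two_pow_toNat (n : Int) (h : 0 ≤ n) : n < 2 ^ n.toNat := by
  have h1 : (n.toNat : Int) < (2:Int) ^ n.toNat := by exact_mod_cast Nat.lt_two_pow_self
  linarith [Int.toNat_of_nonneg h]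

-- ===== VERDICT (by name: the statement is the Claim_ definition above) =====
theorem razved_spec : Claim_equal_razved := by
  intro n _
  unfold Spec_razved razved_alt
  by_cases h : n < 3
  · rw [if_pos h, razved.eq_def, if_neg (by omega), if_pos h]
  · rw [if_neg h]
    obtain ⟨k, hk, hk3, hk6⟩ := razvedLoop_spec n.toNat n 1 (by norm_num) (by omega)
      (by
        have hA := lt_two_pow_toNat n (by omega)
        have hA0 : (0:Int) ≤ 2 ^ n.toNat := by positivity
        nlinarith)
    rw [hk, mul_one] at *
    exact razved_closed k n hk3 (by omega)
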